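-- pv_equiv track=rewrite | github.com/Wyxbqsj/FairOptimalRidesharing | algorithms/BFRM.py | find_second_favorite
-- ===== SOURCE A (Python) =====
-- def find_second_favorite(i, first, last, pref):
--     count = 0
--     for j in range(first[i], last[i] + 1):
--         if not pref[j] == None:
--             count += 1
--         elif count == 0:  # pref[j] is empty then move to the next
--             first[i] += 1
--         if count == 2:
--             return pref[j]
--     return None
-- ===== SOURCE B (Python) =====
-- def find_second_favorite(i, first, last, pref):
--     hits = (pref[j] for j in range(first[i], last[i] + 1) if pref[j] is not None)
--     next(hits, None)
--     return next(hits, None)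
-- ===== Notes on version B (the rewrite author's own statement) =====
-- stated objective: simpler
-- what changed: Replaces the stateful counting loop with a lazy generator over the non-None preferences in the window, consumed twice with next(); B does not mutate first[i] (A does), so the equivalence is about the return value only.
import Mathlib
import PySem

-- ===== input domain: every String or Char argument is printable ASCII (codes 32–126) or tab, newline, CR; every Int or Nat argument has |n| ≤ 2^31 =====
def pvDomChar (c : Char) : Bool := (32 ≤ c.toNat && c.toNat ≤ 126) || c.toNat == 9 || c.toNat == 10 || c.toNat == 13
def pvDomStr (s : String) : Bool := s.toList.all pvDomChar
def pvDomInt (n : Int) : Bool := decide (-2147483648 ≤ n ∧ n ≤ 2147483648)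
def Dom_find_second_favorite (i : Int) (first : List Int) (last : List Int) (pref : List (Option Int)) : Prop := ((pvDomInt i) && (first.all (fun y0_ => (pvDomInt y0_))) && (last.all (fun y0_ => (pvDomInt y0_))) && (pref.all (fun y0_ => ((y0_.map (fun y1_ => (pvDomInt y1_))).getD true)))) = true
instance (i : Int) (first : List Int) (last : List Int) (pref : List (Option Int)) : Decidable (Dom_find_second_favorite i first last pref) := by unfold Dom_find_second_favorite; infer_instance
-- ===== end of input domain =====

-- B replaces A's stateful counting loop by a lazy generator over the non-None preferences in the
-- window, consumed twice with next(); A mutates first[i] in place and B does not, so the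
-- equivalence proved here is about the return value only.

-- ===== PORT A =====
-- loop body of A over the remaining indices j, carrying count; first's mutation does not
-- affect the return value (the range is computed once), so it is not carried.
def fsfLoopA (pref : List (Option Int)) : List Int → Int → Option Int
  | [], _ => none
  | j :: js, count =>
    let v := (PySem.List.pyGet? pref j).getD none
    let count' := if v ≠ none then count + 1 else count
    if count' = 2 then v else fsfLoopA pref js count'

def find_second_favorite (i : Int) (first : List Int) (last : List Int) (pref : List (Option Int)) : Option Int :=
  match PySem.List.pyGet? first i, PySem.List.pyGet? last i with
  | some lo, some hi => fsfLoopA pref (PySem.List.pyRange lo (hi + 1) 1) 0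
  | _, _ => none

-- ===== PORT B =====
-- one next() on the generator: yields the first non-None pref[j] and the remaining indices
def fsfNext (pref : List (Option Int)) : List Int → Option (Int × List Int)
  | [] => none
  | j :: js =>
    match (PySem.List.pyGet? pref j).getD none with
    | some v => some (v, js)
    | none => fsfNext pref js

def find_second_favorite_alt (i : Int) (first : List Int) (last : List Int) (pref : List (Option Int)) : Option Int :=
  (PySem.List.pyGet? first i).bind fun lo =>
  (PySem.List.pyGet? last i).bind fun hi =>
    match fsfNext pref (PySem.List.pyRange lo (hi + 1) 1) with
    | none => none
    | some (_, rest) => (fsfNext pref rest).map Prod.fst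

-- ===== PRECONDITION & SPEC =====
-- Pre_ excludes exactly the inputs where Python A raises IndexError (and B raises it at the same
-- access): i out of range for first/last, a window starting below -len(pref), or a window reaching
-- index len(pref) before a second non-None preference has been found.
def Pre_find_second_favorite (i : Int) (first : List Int) (last : List Int) (pref : List (Option Int)) : Prop :=
  (PySem.List.pyGet? first i).elim False fun lo =>
    (PySem.List.pyGet? last i).elim False fun hi =>
      hi < lo ∨ (-(pref.length : Int) ≤ lo ∧ (hi < (pref.length : Int) ∨
        2 ≤ ((PySem.List.pyRange lo (pref.length : Int) 1).filterMap
              (fun j => (PySem.List.pyGet? pref j).getD none)).length))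

instance (i : Int) (first : List Int) (last : List Int) (pref : List (Option Int)) : Decidable (Pre_find_second_favorite i first last pref) := by
  unfold Pre_find_second_favorite
  rcases PySem.List.pyGet? first i with _ | lo <;> rcases PySem.List.pyGet? last i with _ | hi <;>
    simp only [Option.elim] <;> infer_instance

def pvWitness_find_second_favorite : Int × List Int × List Int × List (Option Int) :=
  (0, [0], [2], [some 3, none, some 5])

def Spec_find_second_favorite (i : Int) (first : List Int) (last : List Int) (pref : List (Option Int)) (out : Option Int) : Prop := out = find_second_favorite_alt i first last pref
instance (i : Int) (first : List Int) (last : List Int) (pref : List (Option Int)) (out : Option Int) : Decidable (Spec_find_second_favorite i first last pref out) := by unfold Spec_find_second_favorite; infer_instance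

-- ===== CLAIM (what is proved, stated in full; the proofs are below) =====
def Claim_equal_find_second_favorite : Prop := ∀ (i : Int) (first : List Int) (last : List Int) (pref : List (Option Int)), Dom_find_second_favorite i first last pref → Pre_find_second_favorite i first last pref → Spec_find_second_favorite i first last pref (find_second_favorite i first last pref)

-- ===== LEMMAS AND PROOFS =====

-- with count = 1 the loop returns the value of the next non-None fetch
theorem fsfLoopA_one (pref : List (Option Int)) (js : List Int) :
    fsfLoopA pref js 1 = (fsfNext pref js).map Prod.fst := by
  induction js with
  | nil => simp [fsfLoopA, fsfNext]
  | cons j js ih =>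
    rcases h : (PySem.List.pyGet? pref j).getD none with _ | a <;>
      simp [fsfLoopA, fsfNext, h, ih]

-- with count = 0 the loop skips to the first non-None fetch and continues with count = 1
theorem fsfLoopA_zero (pref : List (Option Int)) (js : List Int) :
    fsfLoopA pref js 0 =
      match fsfNext pref js with
      | none => none
      | some (_, rest) => fsfLoopA pref rest 1 := by
  induction js with
  | nil => simp [fsfLoopA, fsfNext]
  | cons j js ih =>
    rcases h : (PySem.List.pyGet? pref j).getD none with _ | a <;>
      simp [fsfLoopA, fsfNext, h, ih]

-- ===== VERDICT (by name: the statement is the Claim_ definition above) =====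
theorem find_second_favorite_spec : Claim_equal_find_second_favorite := by
  intro i first last pref _ _
  unfold Spec_find_second_favorite find_second_favorite find_second_favorite_alt
  rcases PySem.List.pyGet? first i with _ | lo <;> rcases PySem.List.pyGet? last i with _ | hi <;>
    simp only [Option.bind]
  rw [fsfLoopA_zero]
  rcases fsfNext pref (PySem.List.pyRange lo (hi + 1) 1) with _ | ⟨v, rest⟩
  · rfl
  · exact fsfLoopA_one pref rest
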